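-- pv_equiv track=rewrite | github.com/domwxyz/marxist-chat | src/core/vector_store.py | _extract_metadata_from_text
-- ===== SOURCE A (Python) =====
-- def _extract_metadata_from_text(text: str):
--     """Extract metadata section from document text"""
--     metadata = {}
--     lines = text.split("\n")
--
--     in_metadata = False
--     for line in lines:
--         if line.strip() == "---":
--             if not in_metadata:
--                 in_metadata = True
--                 continue
--             else:
--                 break
--
--         if in_metadata and ": " in line:
--             key, value = line.split(": ", 1)
--             metadata[key.lower()] = value
--
--     return metadata
-- ===== SOURCE B (Python) =====
-- def _extract_metadata_from_text(text: str):
--     """Extract metadata section from document text"""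
--     lines = text.split("\n")
--     start = next((i for i, l in enumerate(lines) if l.strip() == "---"), None)
--     if start is None:
--         return {}
--     rest = lines[start + 1:]
--     end = next((j for j, l in enumerate(rest) if l.strip() == "---"), len(rest))
--     return {k.lower(): v
--             for k, v in (l.split(": ", 1) for l in rest[:end] if ": " in l)}
-- ===== Notes on version B (the rewrite author's own statement) =====
-- stated objective: alternative
-- what changed: Replaced the flag-driven state machine (an in_metadata boolean mutated across one loop with continue/break) by an explicit boundary-finding decomposition: locate the opening delimiter line, locate the closing one (defaulting to end of input), then build the dict with a comprehension over just the slice between them.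
import Mathlib
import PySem

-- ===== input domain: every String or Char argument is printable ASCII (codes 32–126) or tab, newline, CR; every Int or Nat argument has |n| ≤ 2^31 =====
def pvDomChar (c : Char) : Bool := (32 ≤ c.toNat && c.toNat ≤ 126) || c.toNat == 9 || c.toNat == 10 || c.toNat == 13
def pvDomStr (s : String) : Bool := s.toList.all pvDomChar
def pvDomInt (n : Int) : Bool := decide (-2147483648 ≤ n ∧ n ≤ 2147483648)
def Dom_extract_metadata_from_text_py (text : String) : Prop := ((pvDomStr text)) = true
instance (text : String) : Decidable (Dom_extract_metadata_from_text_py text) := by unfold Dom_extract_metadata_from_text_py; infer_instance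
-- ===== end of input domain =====

-- B replaces A's flag-driven single-loop state machine by an explicit boundary-finding
-- decomposition (find the opening delimiter line, find the closing one defaulting to end,
-- comprehend over the slice between them); same cost, different structure.


-- ===== PORT A =====
-- shared with B: split the line at the first separator, store lowercased key -> value
-- (the catch-all arm is a totality guard only: the split yields exactly two
-- parts whenever the separator is in the line, which both programs have checked already)
def pvInsertLine (d : PySem.Dict String String) (line : String) : PySem.Dict String String :=
  match PySem.Str.splitMax? line ": " 1 with
  | some [key, value] => d.insert (PySem.Str.lower key) value
  | _ => d

-- the body of A's per-line loop, with the in_metadata flag as state;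
-- returning stops the loop (break)
def pvGoA (lines : List String) (metadata : PySem.Dict String String) (in_metadata : Bool) :
    PySem.Dict String String :=
  match lines with
  | [] => metadata
  | line :: rest =>
    if PySem.Str.strip line == "---" then
      if !in_metadata then pvGoA rest metadata true
      else metadata
    else if in_metadata && PySem.Str.isIn ": " line then
      pvGoA rest (pvInsertLine metadata line) in_metadata
    else
      pvGoA rest metadata in_metadata

def extract_metadata_from_text_py (text : String) : List (String × String) :=
  let lines := (PySem.Str.split? text "\n").getD []   -- the separator is nonempty, so split? is always some
  (pvGoA lines PySem.Dict.empty false).items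

-- ===== PORT B =====
def pvIsDelim (l : String) : Bool := PySem.Str.strip l == "---"

def extract_metadata_from_text_py_alt (text : String) : List (String × String) :=
  let lines := (PySem.Str.split? text "\n").getD []
  match lines.findIdx? pvIsDelim with
  | none => []
  | some start =>
    let rest := lines.drop (start + 1)
    let stop := (rest.findIdx? pvIsDelim).getD rest.length
    (((rest.take stop).filter (fun l => PySem.Str.isIn ": " l)).foldl
        pvInsertLine PySem.Dict.empty).items

-- ===== PRECONDITION & SPEC =====
def Spec_extract_metadata_from_text_py (text : String) (out : List (String × String)) : Prop := out = extract_metadata_from_text_py_alt text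
instance (text : String) (out : List (String × String)) : Decidable (Spec_extract_metadata_from_text_py text out) := by unfold Spec_extract_metadata_from_text_py; infer_instance

-- ===== CLAIM (what is proved, stated in full; the proofs are below) =====
def Claim_equal_extract_metadata_from_text_py : Prop := ∀ (text : String), Dom_extract_metadata_from_text_py text → Spec_extract_metadata_from_text_py text (extract_metadata_from_text_py text)

-- ===== LEMMAS AND PROOFS =====

-- the in_metadata = true phase of A's loop folds pvInsertLine over the colon-lines
-- before the next delimiter
theorem pvGoA_true (lines : List String) (d : PySem.Dict String String) :
    pvGoA lines d true =
      ((lines.takeWhile (fun l => !pvIsDelim l)).filter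
          (fun l => PySem.Str.isIn ": " l)).foldl pvInsertLine d := by
  induction lines generalizing d with
  | nil => rfl
  | cons line rest ih =>
    by_cases hdl : (PySem.Str.strip line == "---") = true
    · unfold pvGoA
      rw [if_pos hdl]
      simp [List.takeWhile_cons, pvIsDelim, hdl]
    · unfold pvGoA
      have ht : (!pvIsDelim line) = true := by simp [pvIsDelim, hdl]
      rw [if_neg hdl, List.takeWhile_cons, if_pos ht, List.filter_cons]
      cases hc : PySem.Str.isIn ": " line
      · rw [if_neg (by simp [hc]), if_neg (by simp [hc]), ih]
      · rw [if_pos (by simp [hc]), if_pos (by simp [hc]), ih, List.foldl_cons]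

-- the in_metadata = false phase skips everything until the first delimiter
theorem pvGoA_false (lines : List String) (d : PySem.Dict String String) :
    pvGoA lines d false =
      match lines.findIdx? pvIsDelim with
      | none => d
      | some i => pvGoA (lines.drop (i + 1)) d true := by
  induction lines with
  | nil => rfl
  | cons line rest ih =>
    by_cases hdl : PySem.Str.strip line == "---"
    · simp [pvGoA, hdl, List.findIdx?_cons, pvIsDelim]
    · simp only [pvGoA, hdl, Bool.false_and, List.findIdx?_cons, pvIsDelim]
      simp only [hdl, ih]
      cases h : rest.findIdx? pvIsDelim with
      | none => simp
      | some i => simp [List.drop_succ_cons]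

-- take up to the first delimiter = takeWhile not-delimiter
theorem pvTake_findIdx? (lines : List String) :
    lines.take ((lines.findIdx? pvIsDelim).getD lines.length) =
      lines.takeWhile (fun l => !pvIsDelim l) := by
  induction lines with
  | nil => rfl
  | cons line rest ih =>
    by_cases hdl : pvIsDelim line
    · simp [List.findIdx?_cons, hdl]
    · simp only [List.findIdx?_cons, hdl, List.takeWhile_cons, Bool.not_false, if_true]
      cases h : rest.findIdx? pvIsDelim with
      | none => simp [h] at ih ⊢; exact ih
      | some i => simp [h] at ih ⊢; exact ih

-- ===== VERDICT (by name: the statement is the Claim_ definition above) =====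
theorem extract_metadata_from_text_py_spec : Claim_equal_extract_metadata_from_text_py := by
  intro text _
  unfold Spec_extract_metadata_from_text_py
  unfold extract_metadata_from_text_py extract_metadata_from_text_py_alt
  simp only
  rw [pvGoA_false]
  cases h : ((PySem.Str.split? text "\n").getD []).findIdx? pvIsDelim with
  | none => rfl
  | some i =>
    simp only
    rw [pvGoA_true, pvTake_findIdx?]
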